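-- pv_equiv track=rewrite | github.com/Alexandra-Vogt/lc | lunar_functions.py | ladd
-- ===== SOURCE A (Python) =====
-- def ladd(a, b):
--     """
--     ladd(int a, int b) => int
--     conducts lunar addition on a and b
--     """
--     astr = str(a)
--     bstr = str(b)
--     retstr = ""
--     if len(astr) < len(bstr):
--         smaller = astr
--         bigger = bstr
--     else:
--         smaller = bstr
--         bigger = astr
--     bigger_offset = len(bigger) - len(smaller)
--     i = len(smaller) - 1
--     while i >= 0:
--         if smaller[i] < bigger[i + bigger_offset]:
--             retstr = bigger[i + bigger_offset] + retstr
--         else: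
--             retstr = smaller[i] + retstr
--         i -= 1
--     retstr = bigger[:bigger_offset] + retstr
--     return int(retstr)
-- ===== SOURCE B (Python) =====
-- def _zip_max(xs, ys):
--     # digit-wise max of two right-aligned (reversed) character lists;
--     # the tail of the longer list is copied unchanged
--     if not xs:
--         return ys
--     if not ys:
--         return xs
--     return [max(xs[0], ys[0])] + _zip_max(xs[1:], ys[1:])
--
-- def ladd(a, b):
--     ra = list(str(a))[::-1]
--     rb = list(str(b))[::-1]
--     return int(''.join(_zip_max(ra, rb)[::-1]))
-- ===== Notes on version B (the rewrite author's own statement) =====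
-- stated objective: simpler
-- what changed: Replaces A's smaller/bigger selection, offset index arithmetic, count-down while loop and separate prefix concatenation with a single structural recursion over the two reversed digit-character lists, taking max at each position and copying the longer list's tail.
import Mathlib
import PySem

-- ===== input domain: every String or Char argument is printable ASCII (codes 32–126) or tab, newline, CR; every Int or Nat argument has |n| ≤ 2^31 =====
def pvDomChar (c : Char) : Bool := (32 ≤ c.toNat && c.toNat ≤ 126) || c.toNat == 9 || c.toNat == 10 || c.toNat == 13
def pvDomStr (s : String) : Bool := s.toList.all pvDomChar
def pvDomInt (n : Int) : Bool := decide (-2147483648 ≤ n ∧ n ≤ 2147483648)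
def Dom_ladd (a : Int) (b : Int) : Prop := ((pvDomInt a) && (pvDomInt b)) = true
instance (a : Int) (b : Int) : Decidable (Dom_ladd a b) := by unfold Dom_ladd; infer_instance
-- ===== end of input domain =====

-- B replaces A's offset-indexed count-down loop + prefix concatenation by one structural
-- recursion over the two reversed digit lists (same cost; objective: simpler).

-- ===== PORT A =====
-- the while loop, counting i down from len(smaller)-1; fuel k stands for i+1.
-- indices are provably in range, so pyGetD's default ' ' is never produced.
def laddLoopA (smaller bigger : List Char) (off : Nat) : Nat → List Char → List Char
  | 0, ret => ret
  | k + 1, ret =>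
    let sc := PySem.List.pyGetD smaller (k : Int) ' '
    let bc := PySem.List.pyGetD bigger ((k : Int) + (off : Int)) ' '
    laddLoopA smaller bigger off k ((if sc < bc then bc else sc) :: ret)

-- int(retstr) never raises here (retstr is always a valid integer literal), so getD 0 is never produced.
def ladd (a : Int) (b : Int) : Int :=
  let astr := PySem.Int.toChars a
  let bstr := PySem.Int.toChars b
  let smaller := if astr.length < bstr.length then astr else bstr
  let bigger := if astr.length < bstr.length then bstr else astr
  let off := bigger.length - smaller.length
  let ret := laddLoopA smaller bigger off smaller.length []
  let retstr := PySem.List.slice bigger none (some (off : Int)) ++ ret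
  (PySem.Int.ofChars? retstr).getD 0

-- ===== PORT B =====
def zipMaxB : List Char → List Char → List Char
  | [], ys => ys
  | x :: xs, [] => x :: xs
  | x :: xs, y :: ys => max x y :: zipMaxB xs ys

-- int(...) never raises here (the joined string is always a valid integer literal), so getD 0 is never produced.
def ladd_alt (a : Int) (b : Int) : Int :=
  let ra := (PySem.Int.toChars a).reverse
  let rb := (PySem.Int.toChars b).reverse
  (PySem.Int.ofChars? ((zipMaxB ra rb).reverse)).getD 0

-- ===== PRECONDITION & SPEC =====
def Spec_ladd (a : Int) (b : Int) (out : Int) : Prop := out = ladd_alt a b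
instance (a : Int) (b : Int) (out : Int) : Decidable (Spec_ladd a b out) := by unfold Spec_ladd; infer_instance

-- ===== CLAIM (what is proved, stated in full; the proofs are below) =====
def Claim_equal_ladd : Prop := ∀ (a : Int) (b : Int), Dom_ladd a b → Spec_ladd a b (ladd a b)

-- ===== LEMMAS AND PROOFS =====

theorem if_lt_eq_max (x y : Char) : (if x < y then y else x) = max x y := by
  rcases lt_or_ge x y with h | h
  · simp [h, max_eq_right h.le]
  · simp [not_lt.mpr h, max_eq_left h]

theorem laddLoopA_eq (s g : List Char) (off : Nat) :
    ∀ (k : Nat) (acc : List Char),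
      laddLoopA s g off k acc
        = (List.range k).map (fun j => max (s.getD j ' ') (g.getD (j + off) ' ')) ++ acc := by
  intro k
  induction k with
  | zero => intro acc; simp [laddLoopA]
  | succ k ih =>
    intro acc
    show laddLoopA s g off k _ = _
    rw [ih]
    have hc : ((k : Int) + (off : Int)) = ((k + off : Nat) : Int) := by push_cast; ring
    rw [hc]
    simp only [PySem.List.pyGetD_natCast, if_lt_eq_max, List.range_succ, List.map_append,
      List.map_cons, List.map_nil, List.append_assoc, List.cons_append, List.nil_append]

theorem zipMaxB_comm (xs ys : List Char) : zipMaxB xs ys = zipMaxB ys xs := by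
  induction xs generalizing ys with
  | nil => cases ys <;> rfl
  | cons x xs ih =>
    cases ys with
    | nil => rfl
    | cons y ys => simp [zipMaxB, ih, max_comm]

theorem zipMaxB_eq (xs ys : List Char) (h : xs.length ≤ ys.length) :
    zipMaxB xs ys = List.zipWith max xs ys ++ ys.drop xs.length := by
  induction xs generalizing ys with
  | nil => simp [zipMaxB]
  | cons x xs ih =>
    cases ys with
    | nil => simp at h
    | cons y ys =>
      simp only [List.length_cons, Nat.add_le_add_iff_right] at h
      simp [zipMaxB, ih ys h]

-- A's loop output equals B's zipped-max middle part, for s shorter-or-equal g.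
theorem middle_eq (s g : List Char) (h : s.length ≤ g.length) :
    (List.range s.length).map
        (fun j => max (s.getD j ' ') (g.getD (j + (g.length - s.length)) ' '))
      = (List.zipWith max s.reverse g.reverse).reverse := by
  apply List.ext_getElem
  · simp; omega
  · intro i h1 h2
    have hi : i < s.length := by simpa using h1
    have hz : (List.zipWith max s.reverse g.reverse).length = s.length := by
      simp; omega
    rw [List.getElem_reverse]
    simp only [List.getElem_map, List.getElem_range, List.getElem_zipWith,
      List.getElem_reverse, hz]
    rw [List.getD_eq_getElem s ' ' (by omega),
        List.getD_eq_getElem g ' ' (by omega)]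
    congr 1
    · congr 1; omega
    · congr 1; omega

theorem reverse_drop_reverse (g : List Char) (n : Nat) :
    (g.reverse.drop n).reverse = g.take (g.length - n) := by
  apply List.ext_getElem
  · simp
  · intro i h1 h2
    simp only [List.length_reverse, List.length_drop] at h1
    simp only [List.getElem_reverse, List.getElem_drop, List.getElem_take,
      List.length_reverse, List.length_drop]
    congr 1
    omega

-- the whole string A builds equals the string B builds, assuming s is the shorter list.
theorem main_eq (s g : List Char) (h : s.length ≤ g.length) :
    g.take (g.length - s.length)
        ++ laddLoopA s g (g.length - s.length) s.length []
      = (zipMaxB s.reverse g.reverse).reverse := by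
  rw [laddLoopA_eq, List.append_nil,
      zipMaxB_eq s.reverse g.reverse (by simpa using h)]
  rw [List.reverse_append, List.length_reverse, reverse_drop_reverse,
      middle_eq s g h]

-- ===== VERDICT (by name: the statement is the Claim_ definition above) =====
theorem ladd_spec : Claim_equal_ladd := by
  intro a b _
  unfold Spec_ladd ladd ladd_alt
  by_cases hlt : (PySem.Int.toChars a).length < (PySem.Int.toChars b).length
  · simp only [hlt, if_true]
    rw [PySem.List.slice_to_natCast, main_eq _ _ (le_of_lt hlt)]
  · simp only [hlt, if_false]
    rw [PySem.List.slice_to_natCast, main_eq _ _ (not_lt.mp hlt),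
        zipMaxB_comm]
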